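-- pv_equiv track=rewrite | github.com/itej13/J.A.R.V.I.S. | server/pocket_tts_onnx.py | _find_boundary_indices
-- ===== SOURCE A (Python) =====
-- def _find_boundary_indices(tokens: list[int], boundary_tokens: set[int]) -> list[int]:
--     indices = [0]
--     previous_was_boundary = False
--     for index, token in enumerate(tokens):
--         if token in boundary_tokens:
--             previous_was_boundary = True
--         else:
--             if previous_was_boundary:
--                 indices.append(index)
--             previous_was_boundary = False
--     indices.append(len(tokens))
--     return indices
-- ===== SOURCE B (Python) =====
-- def _find_boundary_indices(tokens: list[int], boundary_tokens: set[int]) -> list[int]: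
--     # Run-based scan: walk maximal runs; after consuming each run of boundary
--     # tokens, record the position of the first following non-boundary token.
--     n = len(tokens)
--     indices = [0]
--     i = 0
--     while i < n:
--         if tokens[i] in boundary_tokens:
--             while i < n and tokens[i] in boundary_tokens:
--                 i += 1
--             if i < n:
--                 indices.append(i)
--         else:
--             i += 1
--     indices.append(n)
--     return indices
-- ===== Notes on version B (the rewrite author's own statement) =====
-- stated objective: alternative
-- what changed: Replaces the per-token previous-was-boundary flag loop by a run-based scan: an outer loop over maximal runs with an inner loop that consumes each whole run of boundary tokens, then records the position of the first following non-boundary token.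
import Mathlib
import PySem

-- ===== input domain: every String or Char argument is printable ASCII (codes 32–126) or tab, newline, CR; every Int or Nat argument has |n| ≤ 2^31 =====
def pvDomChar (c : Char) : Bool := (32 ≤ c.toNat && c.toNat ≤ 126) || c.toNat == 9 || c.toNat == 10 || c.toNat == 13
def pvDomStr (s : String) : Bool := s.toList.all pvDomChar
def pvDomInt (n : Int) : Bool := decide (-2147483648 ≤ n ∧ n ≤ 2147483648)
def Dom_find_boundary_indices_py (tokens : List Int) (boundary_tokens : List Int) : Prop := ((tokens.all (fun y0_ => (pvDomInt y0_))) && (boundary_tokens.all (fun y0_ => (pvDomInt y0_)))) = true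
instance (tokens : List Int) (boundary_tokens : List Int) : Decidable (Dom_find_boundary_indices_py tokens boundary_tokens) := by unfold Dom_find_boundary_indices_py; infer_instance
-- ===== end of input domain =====

-- B replaces A's per-token flag loop by a run-based scan (inner loop consuming each
-- whole run of boundary tokens); same values, alternative decomposition.

-- ===== PORT A =====
-- literal transliteration of A: enumerate loop carrying (indices, previous_was_boundary)
def find_boundary_indices_py (tokens : List Int) (boundary_tokens : List Int) : List Int :=
  let st := (PySem.List.enumerate tokens).foldl
    (fun (st : List Int × Bool) p =>
      if boundary_tokens.contains p.2 then (st.1, true)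
      else ((if st.2 then st.1 ++ [p.1] else st.1), false))
    ([0], false)
  st.1 ++ [(tokens.length : Int)]

-- ===== PORT B =====
-- inner while loop of B: consume a run of boundary tokens, returning the
-- remaining suffix and the position it starts at
def pvDropRun (bt : List Int) : List Int → Int → List Int × Int
  | [], i => ([], i)
  | t :: ts, i => if bt.contains t then pvDropRun bt ts (i + 1) else (t :: ts, i)

theorem pvDropRun_len (bt : List Int) : ∀ (l : List Int) (i : Int), (pvDropRun bt l i).1.length ≤ l.length := by
  intro l
  induction l with
  | nil => intro i; simp [pvDropRun]
  | cons t ts ih =>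
    intro i
    by_cases h : t ∈ bt
    · simpa [pvDropRun, h] using le_trans (ih (i + 1)) (Nat.le_succ _)
    · simp [pvDropRun, h]

-- outer while loop of B (middle indices only)
def pvBLoop (bt : List Int) (l : List Int) (i : Int) : List Int :=
  match h : l with
  | [] => []
  | t :: ts =>
    if bt.contains t then
      match hdr : pvDropRun bt ts (i + 1) with
      | ([], _) => []
      | (u :: us, j) => j :: pvBLoop bt (u :: us) j
    else pvBLoop bt ts (i + 1)
termination_by l.length
decreasing_by
  · have := pvDropRun_len bt ts (i + 1)
    rw [hdr] at this
    simpa using Nat.lt_succ_of_le this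
  · simp

-- transliteration of B: indices = [0]; run-based while loop; append n
def find_boundary_indices_py_alt (tokens : List Int) (boundary_tokens : List Int) : List Int :=
  (0 : Int) :: pvBLoop boundary_tokens tokens 0 ++ [(tokens.length : Int)]

-- ===== PRECONDITION & SPEC =====
def Spec_find_boundary_indices_py (tokens : List Int) (boundary_tokens : List Int) (out : List Int) : Prop := out = find_boundary_indices_py_alt tokens boundary_tokens
instance (tokens : List Int) (boundary_tokens : List Int) (out : List Int) : Decidable (Spec_find_boundary_indices_py tokens boundary_tokens out) := by unfold Spec_find_boundary_indices_py; infer_instance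

-- ===== CLAIM (what is proved, stated in full; the proofs are below) =====
def Claim_equal_find_boundary_indices_py : Prop := ∀ (tokens : List Int) (boundary_tokens : List Int), Dom_find_boundary_indices_py tokens boundary_tokens → Spec_find_boundary_indices_py tokens boundary_tokens (find_boundary_indices_py tokens boundary_tokens)

-- ===== LEMMAS AND PROOFS =====

-- the indices A's loop emits, written as a structural recursion on the token list
def pvEmit (bt : List Int) : List Int → Int → Bool → List Int
  | [], _, _ => []
  | t :: ts, s, prev =>
    (if bt.contains t then [] else if prev then [s] else []) ++ pvEmit bt ts (s + 1) (bt.contains t)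

-- final flag of A's loop
def pvFlag (bt : List Int) : List Int → Bool → Bool
  | [], prev => prev
  | t :: ts, _ => pvFlag bt ts (bt.contains t)

theorem pvLoop_eq (bt : List Int) (ts : List Int) (s : Int) (acc : List Int) (prev : Bool) :
    (PySem.List.enumerate ts s).foldl
      (fun (st : List Int × Bool) p =>
        if bt.contains p.2 then (st.1, true)
        else ((if st.2 then st.1 ++ [p.1] else st.1), false))
      (acc, prev)
    = (acc ++ pvEmit bt ts s prev, pvFlag bt ts prev) := by
  induction ts generalizing s acc prev with
  | nil => simp [PySem.List.enumerate_nil, pvEmit, pvFlag]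
  | cons t ts ih =>
    simp only [PySem.List.enumerate_cons, List.foldl_cons]
    rw [ih]
    by_cases h : t ∈ bt <;> cases prev <;> simp [pvEmit, pvFlag, h]

-- after entering the boundary branch, A's emissions are: drop the run, then
-- emit the stop position and continue with prev = false
theorem pvEmit_true_eq (bt : List Int) : ∀ (l : List Int) (s : Int),
    pvEmit bt l s true
    = match pvDropRun bt l s with
      | ([], _) => []
      | (_ :: us, j) => j :: pvEmit bt us (j + 1) false := by
  intro l
  induction l with
  | nil => intro s; simp [pvEmit, pvDropRun]
  | cons u us ih =>
    intro s
    by_cases h : u ∈ bt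
    · simp only [pvEmit, pvDropRun, h, if_pos, List.contains_eq_mem,
        List.nil_append, decide_true]
      exact ih (s + 1)
    · simp [pvEmit, pvDropRun, h]

theorem pvDropRun_head_not (bt : List Int) : ∀ (l : List Int) (i : Int) (u : Int) (us : List Int) (j : Int),
    pvDropRun bt l i = (u :: us, j) → bt.contains u = false := by
  intro l
  induction l with
  | nil => intro i u us j h; simp [pvDropRun] at h
  | cons t ts ih =>
    intro i u us j h
    by_cases ht : t ∈ bt
    · simp only [pvDropRun, ht, if_pos, List.contains_eq_mem, decide_true] at h
      exact ih _ _ _ _ h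
    · simp only [pvDropRun, ht, List.contains_eq_mem, decide_eq_true_eq, if_neg,
        not_false_iff, Prod.mk.injEq, List.cons.injEq] at h
      obtain ⟨⟨h1, -⟩, -⟩ := h
      subst h1
      simpa using ht

-- B's loop computes exactly A's emissions with prev = false
theorem pvBLoop_eq_emit (bt : List Int) : ∀ (n : ℕ) (l : List Int), l.length ≤ n → ∀ (i : Int),
    pvBLoop bt l i = pvEmit bt l i false := by
  intro n
  induction n with
  | zero =>
    intro l hl i
    interval_cases hl' : l.length
    · rw [List.length_eq_zero_iff.mp hl']; simp [pvBLoop, pvEmit]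
  | succ n ih =>
    intro l hl i
    cases l with
    | nil => simp [pvBLoop, pvEmit]
    | cons t ts =>
      by_cases h : bt.contains t = true
      · rw [pvBLoop]
        simp only [h, if_pos]
        have hdrop := pvDropRun_len bt ts (i + 1)
        simp only [pvEmit, h, if_pos, List.nil_append]
        rw [pvEmit_true_eq]
        cases h2 : pvDropRun bt ts (i + 1) with
        | mk rest j =>
          cases rest with
          | nil => simp
          | cons u us =>
            simp only
            congr 1
            have hu : u ∉ bt := by
              simpa using pvDropRun_head_not bt ts (i + 1) u us j h2
            rw [pvBLoop]
            simp only [pvEmit, hu, List.contains_eq_mem, if_neg,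
              not_false_iff, decide_false, Bool.false_eq_true]
            have hlen : us.length ≤ n := by
              rw [h2] at hdrop
              simp only [List.length_cons] at hdrop hl
              omega
            exact ih us hlen (j + 1)
      · rw [pvBLoop]
        simp only [pvEmit, h, List.contains_eq_mem, if_neg,
          not_false_iff, List.nil_append, Bool.false_eq_true]
        exact ih ts (by simpa using Nat.le_of_succ_le_succ (by simpa using hl)) (i + 1)

-- ===== VERDICT (by name: the statement is the Claim_ definition above) =====
theorem find_boundary_indices_py_spec : Claim_equal_find_boundary_indices_py := by
  intro tokens bt _
  unfold Spec_find_boundary_indices_py find_boundary_indices_py find_boundary_indices_py_alt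
  rw [pvLoop_eq, pvBLoop_eq_emit bt tokens.length tokens le_rfl]
  simp
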